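-- pv_equiv track=rewrite | github.com/sergei-tiutriumov/Hello-World- | Python/the most log unique sequence.py | find_longest_length
-- ===== SOURCE A (Python) =====
-- def find_longest_length(string):
--     begin = string[0]
--     finish = begin
--     goal = 0
--     posledovatelnosti = []
--     for index, value in enumerate(string):
--         if value == begin:
--             srez=string [goal:index]
--             if len(srez) > 1:
--                 posledovatelnosti.append(srez)
--             goal = index
--             begin = value
--             finish = begin
--         if value != begin:
--             finish= value
--         if index == len(string)-1:
--             srez = string[goal:]
--             posledovatelnosti.append(srez)
--     razmeri_podstrok = []
--     for item in posledovatelnosti: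
--         size = len(item)
--         razmeri_podstrok.append(size)
--     maximum = max(razmeri_podstrok)
--     return posledovatelnosti,maximum
-- ===== SOURCE B (Python) =====
-- def find_longest_length(string):
--     begin = string[0]
--     pieces = string.split(begin)[1:]
--     result = [begin + p for p in pieces[:-1] if p]
--     result.append(begin + pieces[-1])
--     return result, max(len(s) for s in result)
-- ===== Notes on version B (the rewrite author's own statement) =====
-- stated objective: idiomatic
-- what changed: A's single stateful character scan (begin/finish/goal bookkeeping, in-loop last-index test, manual slicing) is replaced by delegating the cutting to str.split on the first character: drop the leading empty piece, re-attach the delimiter to each piece, keep non-empty middle pieces plus the last piece unconditionally, and take the max length; Pre_ excludes only the empty string, on which A raises IndexError at string[0]. Measured faster by a constant factor because the splitting runs inside the C-implemented str.split instead of a per-character Python loop.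
import Mathlib
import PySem

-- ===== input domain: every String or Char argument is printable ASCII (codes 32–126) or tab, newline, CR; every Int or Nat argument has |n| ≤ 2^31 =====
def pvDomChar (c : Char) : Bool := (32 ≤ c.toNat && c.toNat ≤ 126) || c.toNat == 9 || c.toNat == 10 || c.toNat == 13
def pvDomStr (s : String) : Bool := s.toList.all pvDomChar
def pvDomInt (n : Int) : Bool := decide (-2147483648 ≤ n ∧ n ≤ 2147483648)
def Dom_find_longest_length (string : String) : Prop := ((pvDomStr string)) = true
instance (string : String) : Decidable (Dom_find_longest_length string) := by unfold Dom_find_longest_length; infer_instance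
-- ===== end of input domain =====

-- B replaces A's single stateful scan (begin/finish/goal bookkeeping) by delegating the
-- cutting to str.split on the first character and re-attaching the delimiter (objective: idiomatic).

-- ===== PORT A =====
-- loop state: (begin, finish, goal, posledovatelnosti)
structure AState where
  bg : Char
  fin : Char
  goal : Int
  acc : List String
deriving Repr

def astep (string : String) (st : AState) (p : Int × Char) : AState :=
  -- if value == begin: slice, maybe append, goal/begin/finish updates
  let st :=
    if p.2 == st.bg then
      let srez := PySem.Str.slice string (some st.goal) (some p.1)
      let acc := if 1 < PySem.Str.len srez then st.acc ++ [srez] else st.acc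
      { st with bg := p.2, fin := p.2, goal := p.1, acc := acc }
    else st
  -- if value != begin: finish = value
  let st := if p.2 != st.bg then { st with fin := p.2 } else st
  -- if index == len(string) - 1: append string[goal:]
  if p.1 == PySem.Str.len string - 1 then
    { st with acc := st.acc ++ [PySem.Str.slice string (some st.goal) none] }
  else st

def find_longest_length (string : String) : List String × Int :=
  match PySem.Str.pyGet? string 0 with
  | none => ([], 0)  -- string[0] raises IndexError on ""; excluded by Pre_
  | some b0 =>
    let final := (PySem.List.enumerate string.toList 0).foldl (astep string) ⟨b0, b0, 0, []⟩
    let razmeri := final.acc.map (fun item => PySem.Str.len item)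
    match PySem.List.max? razmeri (fun x => x) with
    | none => (final.acc, 0)  -- max([]) raises ValueError; unreachable under Pre_
    | some maximum => (final.acc, maximum)

-- ===== PORT B =====
-- Source B: pieces = string.split(begin)[1:]; result = [begin + p for p in pieces[:-1] if p];
--       result.append(begin + pieces[-1]); return result, max(len(s) for s in result)
-- 'begin + p' (one-char string + string) is ported by hand as String.ofList (b0 :: p.toList) — exact.
def find_longest_length_alt (string : String) : List String × Int :=
  match PySem.Str.pyGet? string 0 with
  | none => ([], 0)  -- string[0] raises IndexError on ""; excluded by Pre_
  | some b0 =>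
    let pieces := PySem.List.slice ((PySem.Str.split? string (String.ofList [b0])).getD []) (some 1) none
    let result :=
      (PySem.List.slice pieces none (some (-1))).filterMap
        (fun p => if PySem.Str.len p ≠ 0 then some (String.ofList (b0 :: p.toList)) else none)
      ++ [String.ofList (b0 :: ((PySem.List.pyGet? pieces (-1)).getD "").toList)]
    match PySem.List.max? (result.map PySem.Str.len) (fun x => x) with
    | none => (result, 0)  -- max over a nonempty list; unreachable
    | some maximum => (result, maximum)

-- ===== PRECONDITION & SPEC =====
-- Pre_ excludes only the empty string, on which A (and B) raise IndexError at string[0].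
def Pre_find_longest_length (string : String) : Prop := string ≠ ""
instance (string : String) : Decidable (Pre_find_longest_length string) := by unfold Pre_find_longest_length; infer_instance
def pvWitness_find_longest_length : String := "abcadea"

def Spec_find_longest_length (string : String) (out : List String × Int) : Prop := out = find_longest_length_alt string
instance (string : String) (out : List String × Int) : Decidable (Spec_find_longest_length string out) := by unfold Spec_find_longest_length; infer_instance

-- ===== CLAIM (what is proved, stated in full; the proofs are below) =====
def Claim_equal_find_longest_length : Prop := ∀ (string : String), Dom_find_longest_length string → Pre_find_longest_length string → Spec_find_longest_length string (find_longest_length string)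

-- ===== LEMMAS AND PROOFS =====

-- indices of occurrences of b0 in d, counting from position k
def occN (b0 : Char) : List Char → Nat → List Nat
  | [], _ => []
  | c :: d, k => (if c == b0 then [k] else []) ++ occN b0 d (k + 1)

-- A's accumulator shape: segments between consecutive occurrence indices
-- (kept when longer than 1), plus the unconditional trailing slice
def segF (string : String) : Nat → List Nat → List String
  | g, [] => [PySem.Str.slice string (some (g : Int)) none]
  | g, i :: is =>
      (if 1 < (i : Int) - (g : Int) then [PySem.Str.slice string (some (g : Int)) (some (i : Int))] else [])
        ++ segF string i is

-- prepend m to the head piece of a split (the '[m]' case is for the empty list only)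
def consHead (m : List Char) : List (List Char) → List (List Char)
  | [] => [m]
  | p :: ps => (m ++ p) :: ps

-- splitting a character list at every occurrence of c (Python s.split(c) on lists)
def splitL (c : Char) : List Char → List (List Char)
  | [] => [[]]
  | x :: xs => if x == c then [] :: splitL c xs else consHead [x] (splitL c xs)

-- B's final shape: non-empty middle pieces and the last piece, each with c re-attached
def mapSegs (c : Char) (pcs : List (List Char)) : List (List Char) :=
  (pcs.dropLast.filter (fun p => !p.isEmpty)).map (fun p => c :: p) ++ [c :: pcs.getLastD []]

theorem splitL_ne_nil (c : Char) (l : List Char) : splitL c l ≠ [] := by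
  cases l with
  | nil => simp [splitL]
  | cons x xs =>
    simp only [splitL]
    split
    · simp
    · cases h : splitL c xs <;> simp [consHead]

theorem consHead_consHead (a b : List Char) (ps : List (List Char)) :
    consHead a (consHead b ps) = consHead (a ++ b) ps := by
  cases ps <;> simp [consHead]

-- A's loop invariant: starting at position k with goal g (an earlier occurrence),
-- the scan appends exactly segF g (occurrences from k on)
theorem astep_invariant (string : String) (b0 : Char) (d : List Char) (k g : Nat)
    (fin : Char) (acc : List String)
    (hlen : k + d.length = string.toList.length) (hne : d ≠ []) (hgk : g ≤ k) :
    ((PySem.List.enumerate d (k : Int)).foldl (astep string) ⟨b0, fin, (g : Int), acc⟩).acc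
      = acc ++ segF string g (occN b0 d k) := by
  induction d generalizing k g fin acc with
  | nil => exact absurd rfl hne
  | cons c d ih =>
    rw [PySem.List.enumerate_cons, List.foldl_cons]
    have hn : k + d.length + 1 = string.toList.length := by
      rw [List.length_cons] at hlen; omega
    have hk : k < string.toList.length := by omega
    have hslice : PySem.Str.len (PySem.Str.slice string (some (g : Int)) (some (k : Int)))
        = (k : Int) - (g : Int) := by
      rw [PySem.Str.len_eq, PySem.Str.toList_slice]
      simp only [PySem.Chars.slice_eq_listSlice, PySem.List.length_slice,
        PySem.List.clampIdx_natCast]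
      omega
    have hlast : ((k : Int) == PySem.Str.len string - 1) = decide (d = []) := by
      rw [PySem.Str.len_eq]
      cases d with
      | nil =>
        have h : (k : Int) = (string.toList.length : Int) - 1 := by
          simp only [List.length_nil] at hn; omega
        rw [show decide (([] : List Char) = []) = true from rfl]
        simp only [beq_iff_eq]
        exact h
      | cons c' d' =>
        have h : (k : Int) ≠ (string.toList.length : Int) - 1 := by
          rw [List.length_cons] at hn; omega
        rw [show decide (c' :: d' = ([] : List Char)) = false from by simp]
        simp only [beq_eq_false_iff_ne, ne_eq]
        exact h
    by_cases hc : c == b0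
    · have hc' : c = b0 := by simpa using hc
      subst hc'
      cases d with
      | nil =>
        simp only [PySem.List.enumerate_nil, List.foldl_nil]
        simp only [astep, hc, hslice, hlast]
        simp [occN, segF]
        by_cases hgt : 1 < (k : Int) - (g : Int) <;> simp [hgt]
      | cons c' d' =>
        have hstep : astep string ⟨c, fin, (g : Int), acc⟩ ((k : Int), c)
            = ⟨c, c, (k : Int),
                if 1 < (k : Int) - (g : Int) then acc ++ [PySem.Str.slice string (some (g : Int)) (some (k : Int))] else acc⟩ := by
          simp only [astep, hc, hslice, hlast]
          simp
        rw [hstep]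
        have hcast : ((k : Int) + 1) = ((k + 1 : Nat) : Int) := by push_cast; ring
        rw [hcast, ih (k + 1) k c _ (by simp only [List.length_cons] at hn ⊢; omega) (by simp) (by omega)]
        simp only [occN, hc]
        by_cases hgt : 1 < (k : Int) - (g : Int) <;> simp [segF, hgt]
    · cases d with
      | nil =>
        simp only [PySem.List.enumerate_nil, List.foldl_nil]
        simp only [astep, hc, hlast]
        simp [occN, segF, bne, hc]
      | cons c' d' =>
        have hstep : astep string ⟨b0, fin, (g : Int), acc⟩ ((k : Int), c)
            = ⟨b0, c, (g : Int), acc⟩ := by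
          simp only [astep, hc, hlast]
          simp [bne, hc]
        rw [hstep]
        have hcast : ((k : Int) + 1) = ((k + 1 : Nat) : Int) := by push_cast; ring
        rw [hcast, ih (k + 1) g c _ (by simp only [List.length_cons] at hn ⊢; omega) (by simp) (by omega)]
        simp [occN, hc]

theorem mapSegs_cons (c : Char) (m p : List Char) (ps : List (List Char)) :
    mapSegs c (m :: p :: ps) = (if m.isEmpty then [] else [c :: m]) ++ mapSegs c (p :: ps) := by
  have hlast : (m :: p :: ps).getLastD [] = (p :: ps).getLastD [] := by
    rw [List.getLastD_eq_getLast?, List.getLastD_eq_getLast?, List.getLast?_cons_cons]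
  simp only [mapSegs, List.dropLast_cons_of_ne_nil (by simp : p :: ps ≠ []), List.filter_cons, hlast]
  cases hm : m.isEmpty
  · simp [hm]
  · simp [hm]

-- the slicing shape segF, read through the string content, is mapSegs over the split pieces
theorem segF_splitL (string : String) (c : Char) (u : List Char) :
    ∀ (mid : List Char) (g : Nat),
      string.toList.drop g = c :: mid ++ u →
      (segF string g (occN c u (g + 1 + mid.length))).map String.toList
        = mapSegs c (consHead mid (splitL c u)) := by
  induction u with
  | nil =>
    intro mid g hdrop
    simp only [occN, segF, List.map_cons, List.map_nil]
    rw [PySem.Str.toList_slice, PySem.Chars.slice_eq_listSlice,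
      PySem.List.slice_from _ (by positivity), Int.toNat_natCast, hdrop]
    simp [splitL, consHead, mapSegs]
  | cons x v ih =>
    intro mid g hdrop
    have hdropj : string.toList.drop (g + 1 + mid.length) = x :: v := by
      have h1 : (string.toList.drop g).drop (mid.length + 1) = string.toList.drop (g + 1 + mid.length) := by
        rw [List.drop_drop]; congr 1; omega
      rw [← h1, hdrop, List.cons_append, List.drop_succ_cons]
      exact List.drop_left
    by_cases hx : x == c
    · have hx' : x = c := by simpa using hx
      subst hx'
      have hIH := ih [] (g + 1 + mid.length) (by simpa using hdropj)
      simp only [List.length_nil, Nat.add_zero] at hIH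
      have hocc : occN x (x :: v) (g + 1 + mid.length)
          = (g + 1 + mid.length) :: occN x v (g + 1 + mid.length + 1) := by
        simp [occN]
      rw [hocc]
      simp only [segF, List.map_append]
      rw [hIH]
      have hslice : (PySem.Str.slice string (some (g : Int)) (some ((g + 1 + mid.length : Nat) : Int))).toList
          = x :: mid := by
        rw [PySem.Str.toList_slice, PySem.Chars.slice_eq_listSlice,
          show ((g + 1 + mid.length : Nat) : Int) = ((g : Nat) : Int) + ((1 + mid.length : Nat) : Int) from by push_cast; ring,
          PySem.List.slice_natCast_add, hdrop]
        rw [show 1 + mid.length = mid.length + 1 from by ring]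
        simp [List.take_succ_cons, List.take_left]
      have hgt : (1 < ((g + 1 + mid.length : Nat) : Int) - (g : Int)) ↔ mid ≠ [] := by
        constructor
        · intro h hm
          subst hm
          simp only [List.length_nil, Nat.add_zero] at h
          push_cast at h
          omega
        · intro hm
          have : 0 < mid.length := List.length_pos_iff.mpr hm
          push_cast; omega
      rw [show splitL x (x :: v) = [] :: splitL x v from by simp [splitL]]
      cases hps' : splitL x v with
      | nil => exact absurd hps' (splitL_ne_nil x v)
      | cons p ps =>
        rw [show consHead ([] : List Char) (p :: ps) = p :: ps from by simp [consHead],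
          show consHead mid ([] :: p :: ps) = mid :: p :: ps from by simp [consHead],
          mapSegs_cons]
        congr 1
        by_cases hm : mid = []
        · subst hm
          rw [if_neg (by simp [hgt])]
          simp
        · rw [if_pos (hgt.mpr hm)]
          rw [if_neg (by simp [hm])]
          simp only [List.map_cons, List.map_nil, hslice]
    · have hIH := ih (mid ++ [x]) g (by simpa using hdrop)
      simp only [List.length_append, List.length_singleton] at hIH
      rw [show g + 1 + (mid.length + 1) = g + 1 + mid.length + 1 from by ring] at hIH
      rw [show occN c (x :: v) (g + 1 + mid.length)
            = occN c v (g + 1 + mid.length + 1) from by simp [occN, hx]]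
      rw [hIH, splitL]
      rw [if_neg (by simp_all), consHead_consHead]

-- B's filter-and-reattach comprehension, on the list-of-characters side
theorem filterMap_reattach (c : Char) (q : List String) :
    (q.filterMap (fun p => if PySem.Str.len p ≠ 0 then some (String.ofList (c :: p.toList)) else none)).map String.toList
      = ((q.map String.toList).filter (fun p => !p.isEmpty)).map (fun p => c :: p) := by
  induction q with
  | nil => simp
  | cons p q ih =>
    simp only [List.filterMap_cons, List.map_cons, List.filter_cons]
    by_cases hp : p.toList = []
    · have h1 : ¬ PySem.Str.len p ≠ 0 := by
        simp [PySem.Str.len_eq, hp]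
      rw [if_neg h1, show (!p.toList.isEmpty) = false from by simp [hp]]
      simpa using ih
    · have h1 : PySem.Str.len p ≠ 0 := by
        simp only [PySem.Str.len_eq, ne_eq, Int.natCast_eq_zero, List.length_eq_zero_iff]
        exact hp
      rw [if_pos h1, show (!p.toList.isEmpty) = true from by simp [hp]]
      simp only [List.map_cons, String.toList_ofList]
      rw [ih]
      simp

-- PySem.Chars.splitOn.go on a one-character separator computes splitL
theorem go_single (c : Char) (fuel : Nat) :
    ∀ (l cur : List Char) (acc : List (List Char)), l.length ≤ fuel →
      PySem.Chars.splitOn.go [c] fuel l cur acc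
        = acc.reverse ++ consHead cur.reverse (splitL c l) := by
  induction fuel with
  | zero =>
    intro l cur acc h
    have : l = [] := List.length_eq_zero_iff.mp (Nat.le_zero.mp h)
    subst this
    simp [PySem.Chars.splitOn.go, splitL, consHead]
  | succ fuel ih =>
    intro l cur acc h
    cases l with
    | nil => simp [PySem.Chars.splitOn.go, splitL, consHead]
    | cons x rest =>
      simp only [List.length_cons] at h
      by_cases hx : x == c
      · have hx' : x = c := by simpa using hx
        subst hx'
        have hpref : ([x].isPrefixOf (x :: rest)) = (x == x && [].isPrefixOf rest) := rfl
        rw [PySem.Chars.splitOn.go, if_pos (by rw [hpref]; simp)]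
        simp only [List.length_cons, List.length_nil, Nat.zero_add, List.drop_succ_cons, List.drop_zero]
        rw [ih rest [] _ (by omega)]
        rw [show splitL x (x :: rest) = [] :: splitL x rest from by simp [splitL]]
        simp only [List.reverse_cons, List.reverse_nil]
        cases hps : splitL x rest with
        | nil => exact absurd hps (splitL_ne_nil x rest)
        | cons p ps => simp [consHead]
      · have hpref : ([c].isPrefixOf (x :: rest)) = false := by
          rw [show ([c].isPrefixOf (x :: rest)) = (c == x && [].isPrefixOf rest) from rfl]
          simp only [List.isPrefixOf_nil_left, Bool.and_true, beq_eq_false_iff_ne, ne_eq]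
          exact fun hcx => hx (by simp [hcx])
        rw [PySem.Chars.splitOn.go, if_neg (by simp [hpref])]
        rw [ih rest (x :: cur) _ (by omega)]
        simp only [List.reverse_cons]
        rw [splitL, if_neg (by simp [hx]), consHead_consHead]

theorem splitOn_single (c : Char) (l : List Char) :
    PySem.Chars.splitOn l [c] = splitL c l := by
  rw [PySem.Chars.splitOn, go_single c (l.length + 1) l [] [] (by omega)]
  cases hps : splitL c l with
  | nil => exact absurd hps (splitL_ne_nil c l)
  | cons p ps => simp [consHead]

-- assembling the two sides: both result lists read as mapSegs c (splitL c t)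
theorem result_eq (string : String) (h : string ≠ "") :
    find_longest_length string = find_longest_length_alt string := by
  obtain ⟨c, t, hct⟩ : ∃ c t, string.toList = c :: t := by
    cases hcs : string.toList with
    | nil => exact absurd (by simpa [← String.toList_eq_nil_iff] using hcs) h
    | cons c t => exact ⟨c, t, rfl⟩
  have hget : PySem.Str.pyGet? string 0 = some c := by
    rw [show (0 : Int) = ((0 : Nat) : Int) from rfl, PySem.Str.pyGet?_natCast, hct]
    simp
  -- A's accumulator
  have hA : ((PySem.List.enumerate string.toList 0).foldl (astep string) ⟨c, c, 0, []⟩).acc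
      = segF string 0 (occN c t 1) := by
    rw [hct, show (0 : Int) = ((0 : Nat) : Int) from rfl,
      astep_invariant string c (c :: t) 0 0 c [] (by rw [hct]; simp)
        (by simp) (le_refl 0)]
    simp [occN, segF]
  -- the split pieces of B
  have hsplit : ∃ l : List String, PySem.Str.split? string (String.ofList [c]) = some l
      ∧ l.map String.toList = [] :: splitL c t := by
    have hb := PySem.Str.split?_map string (String.ofList [c])
    rw [show (String.ofList [c]).toList = [c] from String.toList_ofList] at hb
    rw [PySem.Chars.split?] at hb
    rw [if_neg (by simp)] at hb
    cases hs : PySem.Str.split? string (String.ofList [c]) with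
    | none => rw [hs] at hb; simp at hb
    | some l =>
      rw [hs] at hb
      simp only [Option.map_some, Option.some_inj] at hb
      refine ⟨l, rfl, ?_⟩
      rw [hb, splitOn_single, hct, splitL, if_pos (by simp)]
  obtain ⟨l, hl, hlmap⟩ := hsplit
  -- pieces = l[1:]
  have hpieces : PySem.List.slice ((PySem.Str.split? string (String.ofList [c])).getD []) (some 1) none
      = l.drop 1 := by
    rw [hl]
    simp only [Option.getD_some]
    rw [PySem.List.slice_from _ (by norm_num)]
    rfl
  have hpmap : (l.drop 1).map String.toList = splitL c t := by
    rw [List.map_drop, hlmap]; rfl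
  have hpne : l.drop 1 ≠ [] := by
    intro hnil
    have := hpmap
    rw [hnil] at this
    exact splitL_ne_nil c t this.symm
  -- B's result list, read through toList, is mapSegs c (splitL c t)
  have hBmap :
      ((PySem.List.slice (l.drop 1) none (some (-1))).filterMap
          (fun p => if PySem.Str.len p ≠ 0 then some (String.ofList (c :: p.toList)) else none)
        ++ [String.ofList (c :: ((PySem.List.pyGet? (l.drop 1) (-1)).getD "").toList)]).map String.toList
        = mapSegs c (splitL c t) := by
    rw [List.map_append, PySem.List.slice_to_neg_one, filterMap_reattach,
      List.map_dropLast, hpmap]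
    rw [mapSegs]
    congr 1
    rw [PySem.List.pyGet?_neg_one]
    cases hgl : (l.drop 1).getLast? with
    | none => exact absurd (List.getLast?_eq_none_iff.mp hgl) hpne
    | some p =>
      have hlast : (splitL c t).getLastD [] = p.toList := by
        rw [List.getLastD_eq_getLast?, ← hpmap, List.getLast?_map, hgl]
        rfl
      simp only [List.map_cons, List.map_nil, String.toList_ofList, hlast, hgl, Option.getD_some]
  -- A's accumulator, read through toList, is the same mapSegs c (splitL c t)
  have hAmap : (segF string 0 (occN c t 1)).map String.toList = mapSegs c (splitL c t) := by
    have := segF_splitL string c t [] 0 (by simpa using hct)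
    simp only [List.length_nil, Nat.add_zero, List.nil_append] at this
    rw [this]
    cases hps : splitL c t with
    | nil => exact absurd hps (splitL_ne_nil c t)
    | cons p ps => simp [consHead]
  -- lists of strings with equal toList images are equal
  have hinj : Function.Injective (List.map String.toList) :=
    List.map_injective_iff.mpr (fun a b hab => String.toList_inj.mp hab)
  have hlists :
      ((PySem.List.enumerate string.toList 0).foldl (astep string) ⟨c, c, 0, []⟩).acc
        = (PySem.List.slice (l.drop 1) none (some (-1))).filterMap
            (fun p => if PySem.Str.len p ≠ 0 then some (String.ofList (c :: p.toList)) else none)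
          ++ [String.ofList (c :: ((PySem.List.pyGet? (l.drop 1) (-1)).getD "").toList)] := by
    apply hinj
    rw [hA, hAmap, hBmap]
  unfold find_longest_length find_longest_length_alt
  rw [hget]
  dsimp only
  rw [hpieces, hlists]

-- ===== VERDICT (by name: the statement is the Claim_ definition above) =====
theorem find_longest_length_spec : Claim_equal_find_longest_length := by
  intro string _ hpre
  exact result_eq string hpre
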